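-- pv_equiv track=rewrite | github.com/glorisonlai/AdventOfCode | 2025/6_day/sol.py | part1
-- ===== SOURCE A (Python) =====
-- def reduce(fun, arr):
--     if not arr:
--         raise AssertionError('List is empty')
--     arr_iter = iter(arr)
--     accum = next(arr_iter)
--     for e in arr_iter:
--         accum = fun(accum, e)
--     return accum
--
-- def part1(ops, numbers):
--     ops_map = {
--         '+': int.__add__,
--         '*': int.__mul__
--     }
--
--     sum = 0
--
--     for i, arr in enumerate(zip(*numbers)):
--         op = ops_map[ops[i]]
--         sum += reduce(op, arr)
--     return sum
-- ===== SOURCE B (Python) =====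
-- def part1(ops, numbers):
--     if not numbers:
--         return 0
--     ncols = min(len(row) for row in numbers)
--     acc = list(numbers[0][:ncols])
--     for row in numbers[1:]:
--         acc = [a + x if ops[j] == '+' else a * x
--                for j, (a, x) in enumerate(zip(acc, row))]
--     return sum(acc)
-- ===== Notes on version B (the rewrite author's own statement) =====
-- stated objective: alternative
-- what changed: B folds each row into a single per-column accumulator (seeded with the truncated first row, operators applied columnwise per row) instead of A's two-phase build-the-transpose-with-zip(*) then reduce each column separately.
import Mathlib
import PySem

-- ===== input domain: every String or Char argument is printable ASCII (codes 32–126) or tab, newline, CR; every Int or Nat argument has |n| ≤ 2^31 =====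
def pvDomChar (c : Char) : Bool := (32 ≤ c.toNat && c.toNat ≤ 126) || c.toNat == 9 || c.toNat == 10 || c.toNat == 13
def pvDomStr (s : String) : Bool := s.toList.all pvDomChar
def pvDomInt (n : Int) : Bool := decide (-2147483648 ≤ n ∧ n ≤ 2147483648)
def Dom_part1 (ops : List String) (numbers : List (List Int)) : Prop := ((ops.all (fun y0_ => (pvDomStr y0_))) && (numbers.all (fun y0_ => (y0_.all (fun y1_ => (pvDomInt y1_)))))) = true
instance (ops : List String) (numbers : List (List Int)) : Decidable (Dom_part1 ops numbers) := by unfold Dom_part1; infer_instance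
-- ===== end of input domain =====

-- B replaces A's build-the-transpose-then-reduce-each-column pass by a single fold of the rows
-- into a per-column accumulator (alternative decomposition, same cost); equivalence is about the
-- return value only (neither mutates its arguments).

-- ===== PORT A =====
-- helper 'reduce' of Source A; Python raises AssertionError on an empty arr (never reached: zip(*numbers)
-- only yields nonempty tuples), the port returns 0 there
def pvReduce (f : Int → Int → Int) (arr : List Int) : Int :=
  match arr with
  | [] => 0
  | a :: rest => rest.foldl f a

-- termination measure lemma for pvZipStar (cited by its decreasing_by)
theorem pvZipStar_dec (rows : List (List Int)) (hne : rows ≠ [])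
    (hall : ∀ r ∈ rows, r ≠ []) :
    ((rows.map List.tail).map List.length).sum < (rows.map List.length).sum := by
  match rows with
  | [] => exact absurd rfl hne
  | r :: rest =>
    have hr : r ≠ [] := hall r (List.mem_cons_self ..)
    have h1 : r.tail.length < r.length := by
      cases r with
      | nil => exact absurd rfl hr
      | cons a t => simp
    have h2 : ((rest.map List.tail).map List.length).sum ≤ (rest.map List.length).sum := by
      rw [List.map_map]
      exact List.sum_le_sum (fun r _ => by simp [List.length_tail])
    simp only [List.map_cons, List.sum_cons]
    omega

-- zip(*numbers): repeatedly take one element from each row while all are nonempty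
def pvZipStar (rows : List (List Int)) : List (List Int) :=
  if _h : rows ≠ [] ∧ rows.all (fun r => !r.isEmpty) then
    (rows.map (fun r => r.headD 0)) :: pvZipStar (rows.map List.tail)
  else []
termination_by (rows.map List.length).sum
decreasing_by
  simpa using pvZipStar_dec rows _h.1 (fun r hr => by
    have := List.all_eq_true.mp _h.2 r hr; simpa using this)

-- ops_map of Source A (a dict from the operator string to the int operation)
def pvOpsMap : PySem.Dict String (Int → Int → Int) :=
  PySem.Dict.ofList [("+", (· + ·)), ("*", (· * ·))]

def part1 (ops : List String) (numbers : List (List Int)) : Int :=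
  (PySem.List.enumerate (pvZipStar numbers)).foldl
    (fun s p =>
      match pvOpsMap.get? (PySem.List.pyGetD ops p.1 "") with
      | some op => s + pvReduce op p.2
      | none => s)   -- Python: KeyError (and IndexError on ops[i]); excluded by Pre_
    0

-- ===== PORT B =====
def part1_alt (ops : List String) (numbers : List (List Int)) : Int :=
  match numbers with
  | [] => 0
  | first :: rest =>
    let ncols := (((first :: rest).map List.length).min?).getD 0
    let acc0 := first.take ncols
    let accF := rest.foldl (fun acc row =>
      (PySem.List.enumerate (acc.zip row)).map
        (fun p => if PySem.List.pyGetD ops p.1 "" = "+" then p.2.1 + p.2.2 else p.2.1 * p.2.2)) acc0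
    accF.sum

-- ===== PRECONDITION & SPEC =====
-- Pre_ admits exactly the inputs where A returns: A raises (KeyError/IndexError) as soon as some
-- column index j < (minimum row length) has ops[j] missing or not '+'/'*'.
def Pre_part1 (ops : List String) (numbers : List (List Int)) : Prop :=
  ∀ j < ((numbers.map List.length).min?).getD 0,
    j < ops.length ∧ (ops.getD j "" = "+" ∨ ops.getD j "" = "*")
instance (ops : List String) (numbers : List (List Int)) : Decidable (Pre_part1 ops numbers) := by
  unfold Pre_part1; infer_instance

def pvWitness_part1 : List String × List (List Int) := (["+", "*"], [[1, 2], [3, 4]])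

def Spec_part1 (ops : List String) (numbers : List (List Int)) (out : Int) : Prop := out = part1_alt ops numbers
instance (ops : List String) (numbers : List (List Int)) (out : Int) : Decidable (Spec_part1 ops numbers out) := by unfold Spec_part1; infer_instance

-- ===== CLAIM (what is proved, stated in full; the proofs are below) =====
def Claim_equal_part1 : Prop := ∀ (ops : List String) (numbers : List (List Int)), Dom_part1 ops numbers → Pre_part1 ops numbers → Spec_part1 ops numbers (part1 ops numbers)

-- ===== LEMMAS AND PROOFS =====

-- the per-column operation B selects (A selects the same function through its dict under Pre_)
def pvOpAt (ops : List String) (j : Nat) : Int → Int → Int :=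
  if ops.getD j "" = "+" then (· + ·) else (· * ·)

-- the column j of the number rows (what zip(*numbers) produces entrywise)
def pvCol (numbers : List (List Int)) (j : Nat) : List Int :=
  numbers.map (fun r => r.getD j 0)

theorem pv_getD_tail (r : List Int) (j : Nat) : r.tail.getD j 0 = r.getD (j+1) 0 := by
  cases r <;> simp [List.getD]

-- characterisation of the zip(*numbers) port: m columns, where m is the minimum row length
theorem pvZipStar_eq (m : Nat) : ∀ (rows : List (List Int)), rows ≠ [] →
    (∀ r ∈ rows, m ≤ r.length) → (∃ r ∈ rows, r.length = m) →
    pvZipStar rows = (List.range m).map (pvCol rows) := by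
  induction m with
  | zero =>
    intro rows hne hle hex
    obtain ⟨r, hr, hlen⟩ := hex
    rw [pvZipStar]
    rw [dif_neg]
    · simp
    · intro ⟨_, hall⟩
      have := List.all_eq_true.mp hall r hr
      simp [List.length_eq_zero_iff.mp hlen] at this
  | succ m ih =>
    intro rows hne hle hex
    have hnonnil : ∀ r ∈ rows, r ≠ [] := by
      intro r hr h0
      have := hle r hr; simp [h0] at this
    rw [pvZipStar, dif_pos ⟨hne, List.all_eq_true.mpr (fun r hr => by
      simpa [List.isEmpty_iff] using hnonnil r hr)⟩]
    have htails : pvZipStar (rows.map List.tail)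
        = (List.range m).map (pvCol (rows.map List.tail)) := by
      apply ih
      · simpa using hne
      · intro r hr
        obtain ⟨r', hr', rfl⟩ := List.mem_map.mp hr
        have := hle r' hr'; simp [List.length_tail]; omega
      · obtain ⟨r, hr, hlen⟩ := hex
        exact ⟨r.tail, List.mem_map_of_mem hr, by simp [List.length_tail, hlen]⟩
    rw [htails, List.range_succ_eq_map, List.map_cons, List.map_map]
    congr 1
    · apply List.map_congr_left
      intro r hr
      cases r with
      | nil => exact absurd rfl (hnonnil _ hr)
      | cons a t => simp [List.getD]
    · apply List.map_congr_left
      intro j _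
      simp only [Function.comp, pvCol, List.map_map]
      apply List.map_congr_left
      intro r _
      exact pv_getD_tail r j

theorem pv_enum_append {α : Type} (l1 l2 : List α) (s : Int) :
    PySem.List.enumerate (l1 ++ l2) s
      = PySem.List.enumerate l1 s ++ PySem.List.enumerate l2 (s + l1.length) := by
  induction l1 generalizing s with
  | nil => simp [PySem.List.enumerate]
  | cons a t ih => simp [PySem.List.enumerate_cons, ih]; ring_nf

theorem pv_enum_range_map {α : Type} (g : Nat → α) (m : Nat) :
    PySem.List.enumerate ((List.range m).map g) 0
      = (List.range m).map (fun j : Nat => ((j:Int), g j)) := by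
  induction m with
  | zero => rfl
  | succ m ih =>
    rw [List.range_succ, List.map_append, pv_enum_append, ih, List.map_append]
    simp [PySem.List.enumerate_cons, PySem.List.enumerate]

theorem pv_foldl_plus {α : Type} (f : α → Int) (l : List α) :
    ∀ s : Int, l.foldl (fun s x => s + f x) s = s + (l.map f).sum := by
  induction l with
  | nil => simp
  | cons a t ih => intro s; simp [ih]; ring

theorem pv_take_eq (l : List Int) (n : Nat) (h : n ≤ l.length) :
    l.take n = (List.range n).map (fun j => l.getD j 0) := by
  apply List.ext_getElem
  · simp [h]
  · intro i h1 h2; simp at h1 h2 ⊢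
    rw [List.getElem?_eq_getElem (by omega)]; rfl

theorem pv_zip_range_map (m : Nat) (v : Nat → Int) (row : List Int) (h : m ≤ row.length) :
    ((List.range m).map v).zip row = (List.range m).map (fun j => (v j, row.getD j 0)) := by
  apply List.ext_getElem
  · simp; omega
  · intro i h1 h2; simp at h1 h2 ⊢
    rw [List.getElem?_eq_getElem (by omega)]; simp

-- one row folded into B's per-column accumulator
theorem pv_step (ops : List String) (m : Nat) (v : Nat → Int) (row : List Int)
    (h : m ≤ row.length) :
    (PySem.List.enumerate (((List.range m).map v).zip row)).map
        (fun p => if PySem.List.pyGetD ops p.1 "" = "+" then p.2.1 + p.2.2 else p.2.1 * p.2.2)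
      = (List.range m).map (fun j => pvOpAt ops j (v j) (row.getD j 0)) := by
  rw [pv_zip_range_map m v row h, pv_enum_range_map, List.map_map]
  apply List.map_congr_left
  intro j _
  simp only [Function.comp, PySem.List.pyGetD_natCast, pvOpAt]
  split <;> rfl

-- B's fold over the remaining rows, columnwise
theorem pv_fold_inv (ops : List String) :
    ∀ (rest : List (List Int)) (m : Nat) (v : Nat → Int),
    (∀ row ∈ rest, m ≤ row.length) →
    rest.foldl (fun acc row =>
        (PySem.List.enumerate (acc.zip row)).map
          (fun p => if PySem.List.pyGetD ops p.1 "" = "+" then p.2.1 + p.2.2 else p.2.1 * p.2.2))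
      ((List.range m).map v)
      = (List.range m).map
          (fun j => (rest.map (fun r => r.getD j 0)).foldl (pvOpAt ops j) (v j)) := by
  intro rest
  induction rest with
  | nil => intro m v _; simp
  | cons row rest ih =>
    intro m v hle
    rw [List.foldl_cons, pv_step ops m v row (hle row (List.mem_cons_self ..)),
      ih m _ (fun r hr => hle r (List.mem_cons_of_mem _ hr))]
    simp

-- the dict lookups of A under Pre_
theorem pv_get_plus : pvOpsMap.get? "+" = some (· + ·) := rfl
theorem pv_get_mul : pvOpsMap.get? "*" = some (· * ·) := rfl

-- ===== VERDICT (by name: the statement is the Claim_ definition above) =====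
theorem part1_spec : Claim_equal_part1 := by
  intro ops numbers _ hpre
  unfold Spec_part1
  match numbers with
  | [] =>
    show part1 ops [] = part1_alt ops []
    rw [part1, part1_alt, pvZipStar]
    simp
  | first :: rest =>
    set rows := first :: rest with hrows
    obtain ⟨a, hmin⟩ : ∃ a, (rows.map List.length).min? = some a := by
      cases h : (rows.map List.length).min? with
      | none => simp [hrows] at h
      | some a => exact ⟨a, rfl⟩
    obtain ⟨hamem, hale⟩ := List.min?_eq_some_iff.mp hmin
    obtain ⟨rmin, hrmin, hrlen⟩ := List.mem_map.mp hamem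
    have hgetD : ((rows.map List.length).min?).getD 0 = a := by rw [hmin]; rfl
    have hle : ∀ r ∈ rows, a ≤ r.length :=
      fun r hr => hale r.length (List.mem_map_of_mem hr)
    have hex : ∃ r ∈ rows, r.length = a := ⟨rmin, hrmin, hrlen⟩
    have hpre' : ∀ j < a, ops.getD j "" = "+" ∨ ops.getD j "" = "*" := by
      intro j hj
      exact (hpre j (by rw [hgetD]; exact hj)).2
    -- A side
    rw [part1, pvZipStar_eq a rows (by simp [hrows]) hle hex, pv_enum_range_map]
    have hbody : (fun (s : Int) (p : Int × List Int) =>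
        match pvOpsMap.get? (PySem.List.pyGetD ops p.1 "") with
        | some op => s + pvReduce op p.2
        | none => s)
        = (fun s p => s + (match pvOpsMap.get? (PySem.List.pyGetD ops p.1 "") with
            | some op => pvReduce op p.2
            | none => 0)) := by
      funext s p
      cases pvOpsMap.get? (PySem.List.pyGetD ops p.1 "") <;> simp
    rw [hbody, pv_foldl_plus, List.map_map, zero_add]
    -- B side
    rw [part1_alt]
    rw [show (((first :: rest).map List.length).min?).getD 0 = a from hgetD]
    have hfirst : a ≤ first.length := hle first (List.mem_cons_self ..)
    rw [pv_take_eq first a hfirst,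
      pv_fold_inv ops rest a _ (fun r hr => hle r (List.mem_cons_of_mem _ hr))]
    -- termwise equality of the two sums
    congr 1
    apply List.map_congr_left
    intro j hj
    have hj' : j < a := List.mem_range.mp hj
    simp only [Function.comp, PySem.List.pyGetD_natCast]
    rcases hpre' j hj' with h | h <;>
      simp only [h, pv_get_plus, pv_get_mul, pvOpAt, reduceIte, pvReduce, pvCol,
        hrows, List.map_cons] ; rfl
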